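-- pv_equiv track=rewrite | github.com/Mortal/regex-crossword | solver.py | make_xvars
-- ===== SOURCE A (Python) =====
-- from typing import Any, Tuple, Optional, List, Iterable, Dict
--
-- def make_xvars(size: int) -> List[List[str]]:
--     v = []
--     for i in range(size):
--         if i < size // 2:
--             v.append(["r%sc%s" % (j, i) for j in range(size // 2 + i + 1)])
--         else:
--             v.append(["r%sc%s" % (j, i) for j in range(i - size // 2, size)])
--     return v
-- ===== SOURCE B (Python) =====
-- def make_xvars(size):
--     h = size // 2
--     return [["r%sc%s" % (j, i) for j in range(size) if abs(i - j) <= h]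
--             for i in range(size)]
-- ===== Notes on version B (the rewrite author's own statement) =====
-- stated objective: alternative
-- what changed: Instead of computing per-row index ranges with a two-way branch, B scans the full size x size rectangle and keeps cell (j,i) iff abs(i-j) <= size//2, letting the hex shape emerge from a membership predicate.
import Mathlib
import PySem

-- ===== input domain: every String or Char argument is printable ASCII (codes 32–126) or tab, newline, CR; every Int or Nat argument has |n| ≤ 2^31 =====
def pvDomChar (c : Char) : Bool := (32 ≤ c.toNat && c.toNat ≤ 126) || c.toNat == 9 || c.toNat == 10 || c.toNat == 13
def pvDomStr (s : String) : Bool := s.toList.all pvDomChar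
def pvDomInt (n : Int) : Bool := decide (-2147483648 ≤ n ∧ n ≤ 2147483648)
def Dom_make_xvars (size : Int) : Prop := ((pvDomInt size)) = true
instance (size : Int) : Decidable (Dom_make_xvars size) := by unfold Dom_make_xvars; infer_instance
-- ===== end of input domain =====

-- B keeps cell (j,i) of the full size x size rectangle iff |i-j| <= size//2, instead of A's per-row branch-computed index ranges (objective: alternative).


-- ===== PORT A =====
-- "r%sc%s" % (j, i)
def pvCell (j i : Int) : String := "r" ++ PySem.Int.toStr j ++ "c" ++ PySem.Int.toStr i

def make_xvars (size : Int) : List (List String) :=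
  (PySem.List.pyRange 0 size 1).foldl (fun v i =>
    if i < PySem.Int.floordiv size 2 then
      v ++ [(PySem.List.pyRange 0 (PySem.Int.floordiv size 2 + i + 1) 1).map (fun j => pvCell j i)]
    else
      v ++ [(PySem.List.pyRange (i - PySem.Int.floordiv size 2) size 1).map (fun j => pvCell j i)]) []

-- ===== PORT B =====
def make_xvars_alt (size : Int) : List (List String) :=
  let h := PySem.Int.floordiv size 2
  (PySem.List.pyRange 0 size 1).map (fun i =>
    ((PySem.List.pyRange 0 size 1).filter (fun j => decide (|i - j| ≤ h))).map
      (fun j => pvCell j i))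

-- ===== PRECONDITION & SPEC =====
def Spec_make_xvars (size : Int) (out : List (List String)) : Prop := out = make_xvars_alt size
instance (size : Int) (out : List (List String)) : Decidable (Spec_make_xvars size out) := by unfold Spec_make_xvars; infer_instance

-- ===== CLAIM =====
def Claim_equal_make_xvars : Prop := ∀ (size : Int), Dom_make_xvars size → Spec_make_xvars size (make_xvars size)

-- ===== LEMMAS AND PROOFS =====
-- a foldl that only appends a singleton per element is a map
theorem foldl_append_singleton {α β : Type} (f : α → List β) (xs : List α) (acc : List (List β)) :
    xs.foldl (fun v i => v ++ [f i]) acc = acc ++ xs.map f := by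
  induction xs generalizing acc with
  | nil => simp
  | cons x xs ih => simp [List.foldl, ih]

-- filtering a contiguous integer range by an interval predicate yields the clamped sub-range
theorem filter_pyRange_interval (lo hi : Int) :
    ∀ (n : ℕ) (a b : Int), (b - a).toNat = n →
      (PySem.List.pyRange a b 1).filter (fun j => decide (lo ≤ j ∧ j < hi))
        = PySem.List.pyRange (max a lo) (min b hi) 1 := by
  intro n
  induction n with
  | zero =>
    intro a b hn
    have hba : b ≤ a := by omega
    rw [PySem.List.pyRange_one_eq_nil hba, PySem.List.pyRange_one_eq_nil (by omega)]
    simp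
  | succ n ih =>
    intro a b hn
    have hab : a < b := by omega
    rw [PySem.List.pyRange_one_cons hab]
    have hrest := ih (a + 1) b (by omega)
    by_cases hp : lo ≤ a ∧ a < hi
    · have : (a :: PySem.List.pyRange (a+1) b 1).filter (fun j => decide (lo ≤ j ∧ j < hi))
          = a :: (PySem.List.pyRange (a+1) b 1).filter (fun j => decide (lo ≤ j ∧ j < hi)) := by
        simp [List.filter, hp.1, hp.2]
      rw [this, hrest]
      have hmax1 : max (a+1) lo = a + 1 := by omega
      have hmax0 : max a lo = a := by omega
      have hc : PySem.List.pyRange a (min b hi) 1 = a :: PySem.List.pyRange (a+1) (min b hi) 1 :=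
        PySem.List.pyRange_one_cons (by omega)
      rw [hmax1, hmax0, hc]
    · have : (a :: PySem.List.pyRange (a+1) b 1).filter (fun j => decide (lo ≤ j ∧ j < hi))
          = (PySem.List.pyRange (a+1) b 1).filter (fun j => decide (lo ≤ j ∧ j < hi)) := by
        have hb : (decide (lo ≤ a) && decide (a < hi)) = false := by
          rcases not_and_or.mp hp with h | h <;> simp [h]
        simp [List.filter, hb]
      rw [this, hrest]
      by_cases hlo : a < lo
      · have hm : max (a+1) lo = max a lo := by omega
        rw [hm]
      · have hhi : hi ≤ a := by omega
        have h1 : PySem.List.pyRange (max (a+1) lo) (min b hi) 1 = [] :=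
          PySem.List.pyRange_one_eq_nil (by omega)
        have h2 : PySem.List.pyRange (max a lo) (min b hi) 1 = [] :=
          PySem.List.pyRange_one_eq_nil (by omega)
        rw [h1, h2]

-- each row of B's filtered rectangle equals A's branch-selected range
theorem row_eq (size i : Int) (h0 : 0 ≤ i) (hs : i < size) :
    (if i < PySem.Int.floordiv size 2 then
      (PySem.List.pyRange 0 (PySem.Int.floordiv size 2 + i + 1) 1).map (fun j => pvCell j i)
    else
      (PySem.List.pyRange (i - PySem.Int.floordiv size 2) size 1).map (fun j => pvCell j i))
    = ((PySem.List.pyRange 0 size 1).filter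
        (fun j => decide (|i - j| ≤ PySem.Int.floordiv size 2))).map (fun j => pvCell j i) := by
  have hpos : (0:Int) < size := lt_of_le_of_lt h0 hs
  have hfd : PySem.Int.floordiv size 2 = size / 2 := PySem.Int.floordiv_eq_ediv_of_pos (by omega)
  have hdl : 2 * (size / 2) ≤ size := by omega
  have hdu : size ≤ 2 * (size / 2) + 1 := by omega
  simp only [hfd]
  have habs : (fun j => decide (|i - j| ≤ size / 2))
      = (fun j => decide (i - size / 2 ≤ j ∧ j < size / 2 + i + 1)) := by
    funext j
    apply decide_eq_decide.mpr
    constructor <;> intro hh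
    · constructor <;> [skip; skip] <;> (have := abs_le.mp hh; omega)
    · exact abs_le.mpr ⟨by omega, by omega⟩
  rw [habs, filter_pyRange_interval (i - size / 2) (size / 2 + i + 1) (size - 0).toNat 0 size rfl]
  split_ifs with hlt
  · have hmax : max 0 (i - size / 2) = 0 := by omega
    have hmin : min size (size / 2 + i + 1) = size / 2 + i + 1 := by omega
    rw [hmax, hmin]
  · have hmax : max 0 (i - size / 2) = i - size / 2 := by omega
    have hmin : min size (size / 2 + i + 1) = size := by omega
    rw [hmax, hmin]

-- ===== VERDICT =====
theorem make_xvars_spec : Claim_equal_make_xvars := by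
  intro size _
  unfold Spec_make_xvars make_xvars make_xvars_alt
  have hbr : (fun (v : List (List String)) (i : Int) => if i < PySem.Int.floordiv size 2 then
      v ++ [(PySem.List.pyRange 0 (PySem.Int.floordiv size 2 + i + 1) 1).map (fun j => pvCell j i)]
    else
      v ++ [(PySem.List.pyRange (i - PySem.Int.floordiv size 2) size 1).map (fun j => pvCell j i)])
    = fun v i => v ++ [if i < PySem.Int.floordiv size 2 then
      (PySem.List.pyRange 0 (PySem.Int.floordiv size 2 + i + 1) 1).map (fun j => pvCell j i)
    else
      (PySem.List.pyRange (i - PySem.Int.floordiv size 2) size 1).map (fun j => pvCell j i)] := by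
    funext v i; split_ifs <;> rfl
  rw [hbr, foldl_append_singleton, List.nil_append]
  apply List.map_congr_left
  intro i hi
  rw [PySem.List.mem_pyRange_one] at hi
  exact row_eq size i hi.1 hi.2
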